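-- pv_equiv track=rewrite | github.com/DES-Lab/AALpy | aalpy/learning_algs/general_passive/Node.py | join_iterator
-- ===== SOURCE A (Python) =====
-- from typing import Dict, Any, List, Tuple, Iterable, Callable, Union, Set, TypeVar, Iterator
--
-- Key = TypeVar("Key")
--
-- Val = TypeVar("Val")
--
-- def join_iterator(a: Dict[Key, Val], b: Dict[Key, Val], default: Val = None) -> Iterator[Tuple[Key, Val, Val]]:
--     for key, a_val in a.items():
--         b_val = b.get(key, default)
--         yield key, a_val, b_val
--     for key, b_val in b.items():
--         if key in a:
--             continue
--         a_val = a.get(key, default)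
--         yield key, a_val, b_val
-- ===== SOURCE B (Python) =====
-- def join_iterator(a, b, default=None):
--     merged = {k: (av, default) for k, av in a.items()}
--     for k, bv in b.items():
--         merged[k] = (merged.get(k, (default, default))[0], bv)
--     for k, (av, bv) in merged.items():
--         yield k, av, bv
-- ===== Notes on version B (the rewrite author's own statement) =====
-- stated objective: alternative
-- what changed: B builds a single insertion-ordered merge table mapping each key to its paired (a-value, b-value) by one pass over a then one updating pass over b, then emits the table; A instead runs two differently-shaped yield loops each doing cross-lookups into the other dict.
import Mathlib
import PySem

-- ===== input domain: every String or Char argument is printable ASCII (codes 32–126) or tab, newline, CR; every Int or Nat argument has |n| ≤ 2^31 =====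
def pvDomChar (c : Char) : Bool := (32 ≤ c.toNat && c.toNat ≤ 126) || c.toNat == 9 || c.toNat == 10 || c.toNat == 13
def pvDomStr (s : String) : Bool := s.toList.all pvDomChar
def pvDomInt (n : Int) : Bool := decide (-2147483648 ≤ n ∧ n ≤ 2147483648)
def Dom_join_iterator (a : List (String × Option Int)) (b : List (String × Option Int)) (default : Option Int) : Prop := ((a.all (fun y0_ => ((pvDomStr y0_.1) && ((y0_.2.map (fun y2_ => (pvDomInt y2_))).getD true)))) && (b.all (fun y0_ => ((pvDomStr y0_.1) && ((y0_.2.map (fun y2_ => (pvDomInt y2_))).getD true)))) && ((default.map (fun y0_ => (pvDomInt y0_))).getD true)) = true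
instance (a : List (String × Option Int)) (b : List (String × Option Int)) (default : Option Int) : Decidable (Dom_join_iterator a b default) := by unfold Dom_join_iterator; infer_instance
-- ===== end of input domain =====

-- B builds one insertion-ordered merge table of paired values instead of A's two
-- cross-lookup yield loops (objective: alternative); return value only (A is a generator).

-- ===== PORT A =====
-- for key, a_val in a.items(): yield key, a_val, b.get(key, default)
-- for key, b_val in b.items(): if key in a: continue; yield key, a.get(key, default), b_val
def join_iterator (a : List (String × Option Int)) (b : List (String × Option Int)) (default : Option Int) : List (String × Option Int × Option Int) :=
  let da := PySem.Dict.ofList a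
  let db := PySem.Dict.ofList b
  let out1 := da.items.foldl (fun acc p => acc ++ [(p.1, p.2, db.getD p.1 default)]) []
  db.items.foldl (fun acc p =>
    if da.contains p.1 then acc
    else acc ++ [(p.1, da.getD p.1 default, p.2)]) out1

-- ===== PORT B =====
-- merged = {k: (av, default) for k, av in a.items()}
-- for k, bv in b.items(): merged[k] = (merged.get(k, (default, default))[0], bv)
-- for k, (av, bv) in merged.items(): yield k, av, bv
def join_iterator_alt (a : List (String × Option Int)) (b : List (String × Option Int)) (default : Option Int) : List (String × Option Int × Option Int) :=
  let da := PySem.Dict.ofList a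
  let db := PySem.Dict.ofList b
  let merged0 : PySem.Dict String (Option Int × Option Int) :=
    da.items.foldl (fun m p => m.insert p.1 (p.2, default)) PySem.Dict.empty
  let merged := db.items.foldl
    (fun m p => m.insert p.1 ((m.getD p.1 (default, default)).1, p.2)) merged0
  merged.items.map (fun p => (p.1, p.2.1, p.2.2))

-- ===== PRECONDITION & SPEC =====
def Spec_join_iterator (a : List (String × Option Int)) (b : List (String × Option Int)) (default : Option Int) (out : List (String × Option Int × Option Int)) : Prop := out = join_iterator_alt a b default
instance (a : List (String × Option Int)) (b : List (String × Option Int)) (default : Option Int) (out : List (String × Option Int × Option Int)) : Decidable (Spec_join_iterator a b default out) := by unfold Spec_join_iterator; infer_instance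

-- ===== CLAIM (what is proved, stated in full; the proofs are below) =====
def Claim_equal_join_iterator : Prop := ∀ (a : List (String × Option Int)) (b : List (String × Option Int)) (default : Option Int), Dom_join_iterator a b default → Spec_join_iterator a b default (join_iterator a b default)

-- ===== LEMMAS AND PROOFS =====

theorem foldl_yield {α β : Type} (f : α → β) :
    ∀ (l : List α) (init : List β),
      l.foldl (fun acc p => acc ++ [f p]) init = init ++ l.map f
  | [], init => by simp
  | x :: xs, init => by simp [List.foldl, foldl_yield f xs]

theorem foldl_yield_if {α β : Type} (c : α → Bool) (f : α → β) :
    ∀ (l : List α) (init : List β),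
      l.foldl (fun acc p => if c p then acc else acc ++ [f p]) init
        = init ++ (l.filter (fun p => !c p)).map f
  | [], init => by simp
  | x :: xs, init => by
      by_cases h : c x = true <;>
        simp [List.foldl, List.filter, h, foldl_yield_if c f xs]

-- the merge table after the pass over b, characterised item by item
theorem merge_fold_items (default : Option Int) :
    ∀ (l : List (String × Option Int)) (d : PySem.Dict String (Option Int × Option Int)),
      d.keys.Nodup → (l.map (·.1)).Nodup →
      (l.foldl (fun m p => m.insert p.1 ((m.getD p.1 (default, default)).1, p.2)) d).items
        = d.items.map (fun q =>
            match l.find? (fun p => p.1 == q.1) with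
            | some p => (q.1, (q.2.1, p.2))
            | none => q)
          ++ (l.filter (fun p => !d.contains p.1)).map (fun p => (p.1, (default, p.2)))
  | [], d, _, _ => by simp
  | x :: xs, d, hd, hl => by
      have hl' : (x.1 :: xs.map (·.1)).Nodup := by simpa using hl
      have hxs : (xs.map (·.1)).Nodup := (List.nodup_cons.mp hl').2
      have hxnot : x.1 ∉ xs.map (·.1) := (List.nodup_cons.mp hl').1
      have hfindx : xs.find? (fun p => p.1 == x.1) = none := by
        rw [List.find?_eq_none]
        intro p hp hbeq
        exact hxnot (by
          have : p.1 = x.1 := by simpa using hbeq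
          exact this ▸ List.mem_map_of_mem hp)
      by_cases hc : d.contains x.1 = true
      · -- overwrite in place
        have hitems := PySem.Dict.items_insert_of_contains d ((d.getD x.1 (default, default)).1, x.2) hc
        have hkeys : (d.insert x.1 ((d.getD x.1 (default, default)).1, x.2)).keys.Nodup :=
          PySem.Dict.nodup_keys_insert d x.1 _ hd
        rw [List.foldl_cons, merge_fold_items default xs _ hkeys hxs, hitems]
        congr 1
        · -- first summand: maps agree pointwise on d.items
          rw [List.map_map]
          apply List.map_congr_left
          intro q hq
          by_cases hqx : q.1 = x.1
          · have hget : d.getD x.1 (default, default) = q.2 :=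
              PySem.Dict.getD_of_mem_items d (hqx ▸ hq) hd (default, default)
            simp only [Function.comp_apply, hqx, BEq.rfl, if_pos, List.find?_cons, hget]
            simp [hfindx]
          · have hbq : (q.1 == x.1) = false := by simpa using hqx
            have hxq : (x.1 == q.1) = false := by simpa using (Ne.symm hqx)
            simp [hqx, hxq]
        · -- second summand: filters agree
          have hfe : ∀ p ∈ xs,
              (!(d.insert x.1 ((d.getD x.1 (default, default)).1, x.2)).contains p.1)
                = (!d.contains p.1) := by
            intro p hp
            have hne : (p.1 == x.1) = false := by
              by_contra h
              have : p.1 = x.1 := by simpa using (eq_true_of_ne_false h)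
              exact hxnot (this ▸ List.mem_map_of_mem hp)
            rw [PySem.Dict.contains_insert, hne]
            simp
          rw [List.filter_congr hfe, List.filter_cons]
          simp [hc]
      · -- fresh key: appended
        have hcf : d.contains x.1 = false := by simpa using hc
        have hgd : d.getD x.1 (default, default) = (default, default) :=
          PySem.Dict.getD_of_not_contains d (default, default) hcf
        have hitems := PySem.Dict.items_insert_of_not_contains d
          ((d.getD x.1 (default, default)).1, x.2) hcf
        have hkeys : (d.insert x.1 ((d.getD x.1 (default, default)).1, x.2)).keys.Nodup :=
          PySem.Dict.nodup_keys_insert d x.1 _ hd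
        rw [List.foldl_cons, merge_fold_items default xs _ hkeys hxs, hitems]
        have hxne : ∀ q ∈ d.items, q.1 ≠ x.1 := by
          intro q hq hqx
          have : d.contains x.1 = true := by
            rw [PySem.Dict.contains_iff_mem_keys]
            exact hqx ▸ PySem.Dict.mem_keys_of_mem_items d hq
          simp [this] at hcf
        rw [List.map_append]
        have h1 : d.items.map (fun q =>
              match xs.find? (fun p => p.1 == q.1) with
              | some p => (q.1, (q.2.1, p.2))
              | none => q)
            = d.items.map (fun q =>
              match (x :: xs).find? (fun p => p.1 == q.1) with
              | some p => (q.1, (q.2.1, p.2))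
              | none => q) := by
          apply List.map_congr_left
          intro q hq
          have hxq : (x.1 == q.1) = false := by simpa using (Ne.symm (hxne q hq))
          simp [hxq]
        have h2 : [(x.1, ((d.getD x.1 (default, default)).1, x.2))].map (fun q =>
              match xs.find? (fun p => p.1 == q.1) with
              | some p => (q.1, (q.2.1, p.2))
              | none => q)
            = [(x.1, (default, x.2))] := by
          simp [hfindx, hgd]
        have hfe : ∀ p ∈ xs,
            (!(d.insert x.1 ((d.getD x.1 (default, default)).1, x.2)).contains p.1)
              = (!d.contains p.1) := by
          intro p hp
          have hne : (p.1 == x.1) = false := by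
            by_contra h
            have : p.1 = x.1 := by simpa using (eq_true_of_ne_false h)
            exact hxnot (this ▸ List.mem_map_of_mem hp)
          rw [PySem.Dict.contains_insert, hne]
          simp
        rw [h1, h2, List.filter_congr hfe, List.filter_cons]
        simp [hcf]

-- find? on the items of a Nodup-keyed dict is get?
theorem find?_items_eq_get? {ν : Type} (d : PySem.Dict String ν) (hd : d.keys.Nodup) (k : String) :
    d.items.find? (fun p => p.1 == k) = (d.get? k).map (fun v => (k, v)) := by
  cases hf : d.items.find? (fun p => p.1 == k) with
  | none =>
      have : d.get? k = none := by
        rw [PySem.Dict.get?_eq_none_iff_not_mem_keys]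
        intro hk
        simp only [PySem.Dict.keys] at hk
        obtain ⟨p, hp, hp1⟩ := List.mem_map.mp hk
        have := List.find?_eq_none.mp hf p hp
        simp [hp1] at this
      simp [this]
  | some p =>
      obtain ⟨p1, p2⟩ := p
      have hmem := List.mem_of_find?_eq_some hf
      have hpk : p1 = k := by simpa using List.find?_some hf
      subst hpk
      have hg : d.get? p1 = some p2 := PySem.Dict.get?_of_mem_items d hmem hd
      simp [hg]

-- ===== VERDICT (by name: the statement is the Claim_ definition above) =====
theorem join_iterator_spec : Claim_equal_join_iterator := by
  intro a b default _
  unfold Spec_join_iterator join_iterator join_iterator_alt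
  dsimp only
  have hna : (PySem.Dict.ofList a).keys.Nodup := PySem.Dict.nodup_keys_ofList a
  have hnb : (PySem.Dict.ofList b).keys.Nodup := PySem.Dict.nodup_keys_ofList b
  set da := PySem.Dict.ofList a with hda
  set db := PySem.Dict.ofList b with hdb
  -- A's side flattened
  rw [foldl_yield, foldl_yield_if]
  -- B's side: characterise merged0
  have hfresh : ∀ p ∈ da.items, (PySem.Dict.empty : PySem.Dict String (Option Int × Option Int)).contains p.1 = false := by
    intro p _; exact PySem.Dict.contains_empty p.1
  have hm0 : (da.items.foldl (fun m p => m.insert p.1 (p.2, default)) PySem.Dict.empty).items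
      = da.items.map (fun p => (p.1, (p.2, default))) := by
    have := PySem.Dict.items_foldl_insert_fresh da.items (fun p => p.1) (fun p => (p.2, default))
      PySem.Dict.empty hfresh (by simpa [PySem.Dict.keys] using hna)
    simpa using this
  set m0 := da.items.foldl (fun m p => m.insert p.1 (p.2, default)) PySem.Dict.empty with hm0def
  have hm0keys : m0.keys = da.keys := by
    simp only [PySem.Dict.keys, hm0, List.map_map]
    rfl
  have hm0nodup : m0.keys.Nodup := by rw [hm0keys]; exact hna
  have hm0contains : ∀ k, m0.contains k = da.contains k := by
    intro k
    rw [PySem.Dict.contains_eq_decide_mem_keys, PySem.Dict.contains_eq_decide_mem_keys, hm0keys]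
  rw [merge_fold_items default db.items m0 hm0nodup (by simpa [PySem.Dict.keys] using hnb), hm0]
  rw [List.map_append, List.map_map, List.map_map]
  congr 1
  · -- keys of a
    apply List.map_congr_left
    intro q _
    have := find?_items_eq_get? db hnb q.1
    cases hg : db.get? q.1 with
    | none =>
        have hgd : db.getD q.1 default = default := PySem.Dict.getD_of_get?_eq_none db default hg
        simp [Function.comp_apply, this, hg, hgd]
    | some v =>
        have hgd : db.getD q.1 default = v := PySem.Dict.getD_of_get?_eq_some db default hg
        simp [Function.comp_apply, this, hg, hgd]
  · -- keys of b not in a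
    have hfe : ∀ p ∈ db.items, (!m0.contains p.1) = (!da.contains p.1) := by
      intro p _; rw [hm0contains]
    rw [List.filter_congr hfe, List.map_map]
    apply List.map_congr_left
    intro p hp
    have hpc : da.contains p.1 = false := by
      have := List.of_mem_filter hp
      simpa using this
    have : da.getD p.1 default = default := PySem.Dict.getD_of_not_contains da default hpc
    simp [Function.comp_apply, this]
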